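-- pv_equiv track=rewrite | github.com/Hsiangpo/OldironCrawler | src/oldironcrawler/extractor/llm_client.py | _abbreviate_representative_content
-- ===== SOURCE A (Python) =====
-- _REPRESENTATIVE_CONTENT_HINTS = (
--     "about", "accountant", "bio", "board", "chief", "co-founder", "contact",
--     "director", "executive", "founder", "general partner", "impressum", "imprint",
--     "leadership", "management", "officer", "our story", "owner", "partner",
--     "people", "president", "principal", "profile", "referral", "solicitor",
--     "team", "vice-chancellor", "who we are",
-- )
--
-- _REPRESENTATIVE_DROP_HINTS = (
--     "analytics purposes",
--     "accept all cookies",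
--     "already working at",
--     "candidate connect login",
--     "career site by teamtailor",
--     "cookie policy",
--     "cookie preferences",
--     "decline all non-necessary cookies",
--     "employee login",
--     "log in as employee",
--     "log in to connect",
--     "manage cookies",
--     "select which cookies you accept",
--     "strictly necessary",
--     "this website uses cookies",
--     "withdraw and manage your consent",
-- )
--
-- _REPRESENTATIVE_HEAD_LINE_LIMIT = 24
--
-- _REPRESENTATIVE_TAIL_LINE_LIMIT = 16
--
-- def _abbreviate_representative_content(content: str) -> str:
--     lines = _strip_representative_noise_lines(content)
--     if not lines:
--         return str(content or "").strip()
--     windows = _collect_representative_windows(lines)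
--     abbreviated: list[str] = []
--     seen: set[str] = set()
--     if windows:
--         abbreviated.append("--- 重点片段 ---")
--         for start, end in windows:
--             _append_unique_lines(abbreviated, lines[start:end], seen)
--             abbreviated.append("---")
--         if abbreviated and abbreviated[-1] == "---":
--             abbreviated.pop()
--     abbreviated.append("--- 页面开头 ---")
--     _append_unique_lines(abbreviated, lines[:_REPRESENTATIVE_HEAD_LINE_LIMIT], seen)
--     if len(lines) > _REPRESENTATIVE_TAIL_LINE_LIMIT:
--         abbreviated.append("--- 末尾上下文 ---")
--         _append_unique_lines(abbreviated, lines[-_REPRESENTATIVE_TAIL_LINE_LIMIT:], seen)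
--     return "\n".join(abbreviated).strip()
--
-- def _strip_representative_noise_lines(content: str) -> list[str]:
--     text = str(content or "").strip()
--     raw_lines = [line.strip() for line in text.splitlines() if line.strip()]
--     return [
--         line
--         for line in raw_lines
--         if not any(noise in line.lower() for noise in _REPRESENTATIVE_DROP_HINTS)
--     ]
--
-- def _append_unique_lines(target: list[str], source: list[str], seen: set[str]) -> None:
--     for line in source:
--         if line in seen:
--             continue
--         seen.add(line)
--         target.append(line)
--
-- def _collect_representative_windows(lines: list[str]) -> list[tuple[int, int]]:
--     windows: list[tuple[int, int]] = []
--     for index, line in enumerate(lines):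
--         lowered = line.lower()
--         if any(hint in lowered for hint in _REPRESENTATIVE_CONTENT_HINTS):
--             windows.append((max(0, index - 2), min(len(lines), index + 8)))
--     if not windows:
--         return []
--     merged: list[tuple[int, int]] = []
--     start, end = windows[0]
--     for next_start, next_end in windows[1:]:
--         if next_start <= end + 2:
--             end = max(end, next_end)
--             continue
--         merged.append((start, end))
--         start, end = next_start, next_end
--     merged.append((start, end))
--     return merged[:8]
-- ===== SOURCE B (Python) =====
-- _REPRESENTATIVE_CONTENT_HINTS = (
--     "about", "accountant", "bio", "board", "chief", "co-founder", "contact",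
--     "director", "executive", "founder", "general partner", "impressum", "imprint",
--     "leadership", "management", "officer", "our story", "owner", "partner",
--     "people", "president", "principal", "profile", "referral", "solicitor",
--     "team", "vice-chancellor", "who we are",
-- )
--
-- _REPRESENTATIVE_DROP_HINTS = (
--     "analytics purposes",
--     "accept all cookies",
--     "already working at",
--     "candidate connect login",
--     "career site by teamtailor",
--     "cookie policy",
--     "cookie preferences",
--     "decline all non-necessary cookies",
--     "employee login",
--     "log in as employee",
--     "log in to connect",
--     "manage cookies",
--     "select which cookies you accept",
--     "strictly necessary",
--     "this website uses cookies",
--     "withdraw and manage your consent",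
-- )
--
-- _REPRESENTATIVE_HEAD_LINE_LIMIT = 24
--
-- _REPRESENTATIVE_TAIL_LINE_LIMIT = 16
--
--
-- def _abbreviate_representative_content(content: str) -> str:
--     text = str(content or "").strip()
--     # one pass: strip, drop blank and noise lines
--     lines = []
--     for raw in text.splitlines():
--         s = raw.strip()
--         if s and not any(noise in s.lower() for noise in _REPRESENTATIVE_DROP_HINTS):
--             lines.append(s)
--     if not lines:
--         return text
--     n = len(lines)
--     # boolean coverage mask over positions 0..n+1: each hint line i covers
--     # [max(0, i-2), min(n, i+8)) padded by 2 so that gaps <= 2 fuse into one run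
--     covered = bytearray(n + 2)
--     for i, line in enumerate(lines):
--         low = line.lower()
--         if any(hint in low for hint in _REPRESENTATIVE_CONTENT_HINTS):
--             for j in range(max(0, i - 2), min(n, i + 8) + 2):
--                 covered[j] = 1
--     # extract up to 8 maximal covered runs; un-pad the right edge by 2
--     runs = []
--     j = 0
--     while j < n + 2 and len(runs) < 8:
--         if covered[j]:
--             a = j
--             while j < n + 2 and covered[j]:
--                 j += 1
--             runs.append((a, j - 2))
--         else:
--             j += 1
--     out = []
--     seen = set()
--
--     def add(segment):
--         for ln in segment:
--             if ln not in seen: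
--                 seen.add(ln)
--                 out.append(ln)
--
--     if runs:
--         out.append("--- 重点片段 ---")
--         for k, (a, b) in enumerate(runs):
--             if k:
--                 out.append("---")
--             add(lines[a:b])
--     out.append("--- 页面开头 ---")
--     add(lines[:_REPRESENTATIVE_HEAD_LINE_LIMIT])
--     if n > _REPRESENTATIVE_TAIL_LINE_LIMIT:
--         out.append("--- 末尾上下文 ---")
--         add(lines[-_REPRESENTATIVE_TAIL_LINE_LIMIT:])
--     return "\n".join(out).strip()
-- ===== Notes on version B (the rewrite author's own statement) =====
-- stated objective: alternative
-- what changed: The interval bookkeeping (collect hint windows, then a stateful merge fold with a +2 gap tolerance, then merged[:8]) is replaced by a boolean coverage mask over line positions: each hint line marks its padded window in the mask, maximal covered runs are scanned out directly (padding by 2 makes gap-bridging automatic), and the noise-line stripping is fused into one pass; section separators are emitted between runs instead of appended-then-popped.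
import Mathlib
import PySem

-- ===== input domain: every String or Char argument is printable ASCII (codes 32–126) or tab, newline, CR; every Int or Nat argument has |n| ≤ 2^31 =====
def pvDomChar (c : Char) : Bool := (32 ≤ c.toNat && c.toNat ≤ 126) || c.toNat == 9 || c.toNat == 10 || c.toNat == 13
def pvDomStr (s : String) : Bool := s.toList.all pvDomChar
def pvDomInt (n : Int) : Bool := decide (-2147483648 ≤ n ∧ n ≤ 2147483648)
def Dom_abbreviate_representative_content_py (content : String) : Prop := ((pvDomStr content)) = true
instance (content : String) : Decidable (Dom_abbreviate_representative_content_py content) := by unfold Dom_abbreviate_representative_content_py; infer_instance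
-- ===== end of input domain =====

-- B replaces A's collect-windows/stateful-merge/[:8] interval pipeline by a boolean coverage
-- mask over line positions (padded windows marked, maximal runs scanned out) and fuses the
-- noise stripping into one pass; same return value, similar cost (objective: alternative).

-- shared module constants (identical tuples in both Python sources)
def pvHints : List String := ["about", "accountant", "bio", "board", "chief", "co-founder", "contact",
  "director", "executive", "founder", "general partner", "impressum", "imprint",
  "leadership", "management", "officer", "our story", "owner", "partner",
  "people", "president", "principal", "profile", "referral", "solicitor",
  "team", "vice-chancellor", "who we are"]

def pvDrops : List String := ["analytics purposes", "accept all cookies", "already working at",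
  "candidate connect login", "career site by teamtailor", "cookie policy", "cookie preferences",
  "decline all non-necessary cookies", "employee login", "log in as employee", "log in to connect",
  "manage cookies", "select which cookies you accept", "strictly necessary",
  "this website uses cookies", "withdraw and manage your consent"]

-- ===== PORT A =====

-- _strip_representative_noise_lines
def pvStripNoiseLines (content : String) : List String :=
  let text := PySem.Str.strip (if content = "" then "" else content)  -- str(content or "").strip()
  let rawLines := ((PySem.Str.splitlines text).filter
      (fun line => PySem.Str.strip line ≠ "")).map PySem.Str.strip
  rawLines.filter (fun line => ! pvDrops.any (fun noise => PySem.Str.isIn noise (PySem.Str.lower line)))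

-- _collect_representative_windows
def pvCollectWindows (lines : List String) : List (Int × Int) :=
  let windows := (PySem.List.enumerate lines 0).foldl
    (fun (ws : List (Int × Int)) p =>
      if pvHints.any (fun h => PySem.Str.isIn h (PySem.Str.lower p.2))
      then ws ++ [(max 0 (p.1 - 2), min (PySem.List.len lines) (p.1 + 8))]
      else ws) []
  match windows with
  | [] => []
  | (s0, e0) :: rest =>
    let fin := rest.foldl
      (fun (acc : List (Int × Int) × Int × Int) nw =>
        if nw.1 ≤ acc.2.2 + 2 then (acc.1, acc.2.1, max acc.2.2 nw.2)
        else (acc.1 ++ [(acc.2.1, acc.2.2)], nw.1, nw.2)) ([], s0, e0)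
    PySem.List.slice (fin.1 ++ [(fin.2.1, fin.2.2)]) none (some 8)

-- _append_unique_lines (returns the new target list and seen set)
def pvAppendUnique (target : List String) (source : List String) (seen : PySem.Set String) :
    List String × PySem.Set String :=
  source.foldl (fun acc line =>
    if PySem.Set.contains acc.2 line then acc
    else (acc.1 ++ [line], PySem.Set.add acc.2 line)) (target, seen)

def abbreviate_representative_content_py (content : String) : String :=
  let lines := pvStripNoiseLines content
  if lines = [] then PySem.Str.strip (if content = "" then "" else content)
  else
    let windows := pvCollectWindows lines
    let st :=
      if windows ≠ [] then
        let st1 := windows.foldl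
          (fun (acc : List String × PySem.Set String) w =>
            let acc2 := pvAppendUnique acc.1 (PySem.List.slice lines (some w.1) (some w.2)) acc.2
            (acc2.1 ++ ["---"], acc2.2))
          ((["--- 重点片段 ---"] : List String), ([] : PySem.Set String))
        (if st1.1 ≠ [] ∧ st1.1.getLast? = some "---" then st1.1.dropLast else st1.1, st1.2)
      else (([] : List String), ([] : PySem.Set String))
    let st2 := pvAppendUnique (st.1 ++ ["--- 页面开头 ---"]) (PySem.List.slice lines none (some 24)) st.2
    let fin :=
      if PySem.List.len lines > 16 then
        (pvAppendUnique (st2.1 ++ ["--- 末尾上下文 ---"]) (PySem.List.slice lines (some (-16)) none) st2.2).1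
      else st2.1
    PySem.Str.strip (PySem.Str.join "\n" fin)

-- ===== PORT B =====

-- coverage mask: each hint line i marks positions [max(0,i-2), min(n,i+8)+2)
def pvAltCovered (lines : List String) : List Bool :=
  (PySem.List.enumerate lines 0).foldl
    (fun c p =>
      if pvHints.any (fun h => PySem.Str.isIn h (PySem.Str.lower p.2))
      then (PySem.List.pyRange (max 0 (p.1 - 2)) (min (PySem.List.len lines) (p.1 + 8) + 2) 1).foldl
             (fun c2 j => PySem.List.pySetD c2 j true) c
      else c)
    (List.replicate (lines.length + 2) false)

-- inner while: advance while in range and covered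
def pvAltFindEnd (c : List Bool) (j : Nat) : Nat :=
  if j < c.length ∧ c.getD j false = true then pvAltFindEnd c (j + 1) else j
termination_by c.length - j
decreasing_by omega

theorem pvAltFindEnd_le (c : List Bool) (j : Nat) : j ≤ pvAltFindEnd c j := by
  fun_induction pvAltFindEnd c j with
  | case1 j h ih => omega
  | case2 j h => omega

theorem pvAltFindEnd_gt (c : List Bool) (j : Nat) (h : j < c.length)
    (hc : c.getD j false = true) : j < pvAltFindEnd c j := by
  rw [pvAltFindEnd]
  simp only [h, hc, and_self, if_true]
  have := pvAltFindEnd_le c (j + 1)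
  omega

-- outer while: extract maximal covered runs, recording (start, end-2)
def pvAltScanRuns (c : List Bool) (j : Nat) : List (Nat × Nat) :=
  if h : j < c.length then
    if hc : c.getD j false = true then
      (j, pvAltFindEnd c j - 2) :: pvAltScanRuns c (pvAltFindEnd c j)
    else pvAltScanRuns c (j + 1)
  else []
termination_by c.length - j
decreasing_by
  · have := pvAltFindEnd_gt c j h hc
    omega
  · omega

-- B's local `add` (dedup append over the shared seen set)
def pvAltAdd (acc : List String × PySem.Set String) (segment : List String) :
    List String × PySem.Set String :=
  segment.foldl (fun acc line =>
    if PySem.Set.contains acc.2 line then acc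
    else (acc.1 ++ [line], PySem.Set.add acc.2 line)) acc

def abbreviate_representative_content_py_alt (content : String) : String :=
  let text := PySem.Str.strip (if content = "" then "" else content)
  let lines := (PySem.Str.splitlines text).foldl
    (fun acc raw =>
      if PySem.Str.strip raw ≠ "" ∧
         pvDrops.any (fun noise => PySem.Str.isIn noise (PySem.Str.lower (PySem.Str.strip raw))) = false
      then acc ++ [PySem.Str.strip raw] else acc) []
  if lines = [] then text
  else
    let covered := pvAltCovered lines
    let runs := PySem.List.slice (pvAltScanRuns covered 0) none (some 8)   -- runs[:8]
    let st :=
      if runs ≠ [] then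
        (PySem.List.enumerate runs 0).foldl
          (fun (acc : List String × PySem.Set String) p =>
            let acc1 := if p.1 ≠ 0 then (acc.1 ++ ["---"], acc.2) else acc
            pvAltAdd acc1 ((lines.drop p.2.1).take (p.2.2 - p.2.1)))  -- lines[a:b], 0 ≤ a ≤ b ≤ n (PySem.List.slice_natCast)
          ((["--- 重点片段 ---"] : List String), ([] : PySem.Set String))
      else (([] : List String), ([] : PySem.Set String))
    let st2 := pvAltAdd (st.1 ++ ["--- 页面开头 ---"], st.2) (PySem.List.slice lines none (some 24))
    let fin :=
      if lines.length > 16 then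
        (pvAltAdd (st2.1 ++ ["--- 末尾上下文 ---"], st2.2) (PySem.List.slice lines (some (-16)) none)).1
      else st2.1
    PySem.Str.strip (PySem.Str.join "\n" fin)

-- ===== PRECONDITION & SPEC =====
def Spec_abbreviate_representative_content_py (content : String) (out : String) : Prop := out = abbreviate_representative_content_py_alt content
instance (content : String) (out : String) : Decidable (Spec_abbreviate_representative_content_py content out) := by unfold Spec_abbreviate_representative_content_py; infer_instance

-- ===== CLAIM (what is proved, stated in full; the proofs are below) =====
def Claim_equal_abbreviate_representative_content_py : Prop := ∀ (content : String), Dom_abbreviate_representative_content_py content → Spec_abbreviate_representative_content_py content (abbreviate_representative_content_py content)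


-- ===== LEMMAS AND PROOFS =====

-- ---- shared abbreviations (proof side) ----

def pvHintB (line : String) : Bool := pvHints.any (fun h => PySem.Str.isIn h (PySem.Str.lower line))

def pvHs (lines : List String) : List Nat :=
  (List.range lines.length).filter (fun k => pvHintB (lines.getD k ""))

-- A's merge loop, as a recursion (Int, unpadded ends, gap tolerance 2)
def pvMergeGoInt (s e : Int) : List (Int × Int) → List (Int × Int)
  | [] => [(s, e)]
  | (s', e') :: r => if s' ≤ e + 2 then pvMergeGoInt s (max e e') r else (s, e) :: pvMergeGoInt s' e' r

-- reference merge (Nat, padded half-open intervals, plain overlap-or-touch)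
def pvMergeGo (s e : Nat) : List (Nat × Nat) → List (Nat × Nat)
  | [] => [(s, e)]
  | (s', e') :: r => if s' ≤ e then pvMergeGo s (max e e') r else (s, e) :: pvMergeGo s' e' r

-- "rs is the list of maximal runs of c from position t on"
def pvOkFrom (c : Nat → Bool) : Nat → List (Nat × Nat) → Prop
  | t, [] => ∀ j, t ≤ j → c j = false
  | t, (s, e) :: r =>
      t ≤ s ∧ s < e ∧ (∀ j, t ≤ j → j < s → c j = false) ∧
      (∀ j, s ≤ j → j < e → c j = true) ∧ c e = false ∧ pvOkFrom c (e + 1) r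

-- ---- runs-spec machinery ----

theorem pvOk_unique (c : Nat → Bool) :
    ∀ (rs rs' : List (Nat × Nat)) (t : Nat), pvOkFrom c t rs → pvOkFrom c t rs' → rs = rs' := by
  intro rs
  induction rs with
  | nil =>
    intro rs' t h h'
    cases rs' with
    | nil => rfl
    | cons p r' =>
      obtain ⟨s, e⟩ := p
      obtain ⟨h1, h2, h3, h4, h5, h6⟩ := h'
      have := h s h1
      have := h4 s le_rfl h2
      simp_all
  | cons p r ih =>
    intro rs' t h h'
    obtain ⟨s, e⟩ := p
    obtain ⟨h1, h2, h3, h4, h5, h6⟩ := h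
    cases rs' with
    | nil =>
      have := h' s h1
      have := h4 s le_rfl h2
      simp_all
    | cons p' r' =>
      obtain ⟨s', e'⟩ := p'
      obtain ⟨g1, g2, g3, g4, g5, g6⟩ := h'
      have hss : s = s' := by
        rcases Nat.lt_trichotomy s s' with hlt | heq | hgt
        · have := g3 s h1 hlt
          have := h4 s le_rfl h2
          simp_all
        · exact heq
        · have := h3 s' g1 hgt
          have := g4 s' le_rfl g2
          simp_all
      subst hss
      have hee : e = e' := by
        rcases Nat.lt_trichotomy e e' with hlt | heq | hgt
        · have := g4 e (by omega) hlt
          simp_all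
        · exact heq
        · have := h4 e' (by omega) hgt
          simp_all
      subst hee
      have := ih r' (e + 1) h6 g6
      rw [this]

theorem pvOk_weaken (c : Nat → Bool) (t : Nat) (rs : List (Nat × Nat))
    (h : pvOkFrom c (t + 1) rs) (hc : c t = false) : pvOkFrom c t rs := by
  cases rs with
  | nil =>
    intro j hj
    rcases Nat.eq_or_lt_of_le hj with rfl | hlt
    · exact hc
    · exact h j hlt
  | cons p r =>
    obtain ⟨s, e⟩ := p
    obtain ⟨h1, h2, h3, h4, h5, h6⟩ := h
    refine ⟨by omega, h2, ?_, h4, h5, h6⟩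
    intro j hj hjs
    rcases Nat.eq_or_lt_of_le hj with rfl | hlt
    · exact hc
    · exact h3 j hlt hjs

theorem pvOk_shift (c : Nat → Bool) (t : Nat) (rs : List (Nat × Nat))
    (h : pvOkFrom c t rs) (hc : c t = false) : pvOkFrom c (t + 1) rs := by
  cases rs with
  | nil => intro j hj; exact h j (by omega)
  | cons p r =>
    obtain ⟨s, e⟩ := p
    obtain ⟨h1, h2, h3, h4, h5, h6⟩ := h
    have hts : t ≠ s := by
      intro heq
      have := h4 s le_rfl h2
      rw [← heq] at this
      simp_all
    refine ⟨by omega, h2, ?_, h4, h5, h6⟩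
    intro j hj hjs
    exact h3 j (by omega) hjs

-- ---- findEnd / scan facts ----

theorem pvAltFindEnd_covered (c : List Bool) (j : Nat) :
    ∀ k, j ≤ k → k < pvAltFindEnd c j → c.getD k false = true := by
  fun_induction pvAltFindEnd c j with
  | case1 j h ih =>
    intro k hk1 hk2
    rcases Nat.eq_or_lt_of_le hk1 with rfl | hlt
    · exact h.2
    · exact ih k hlt hk2
  | case2 j h =>
    intro k hk1 hk2
    omega

theorem pvAltFindEnd_stop (c : List Bool) (j : Nat) :
    c.getD (pvAltFindEnd c j) false = false := by
  fun_induction pvAltFindEnd c j with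
  | case1 j h ih => exact ih
  | case2 j h =>
    by_cases hj : j < c.length
    · simp only [hj, true_and] at h
      simpa using h
    · exact List.getD_eq_default _ _ (by omega)

-- proof-side twin of pvAltScanRuns that stores the raw (padded) run ends
def pvRawRuns (c : List Bool) (j : Nat) : List (Nat × Nat) :=
  if h : j < c.length then
    if hc : c.getD j false = true then
      (j, pvAltFindEnd c j) :: pvRawRuns c (pvAltFindEnd c j)
    else pvRawRuns c (j + 1)
  else []
termination_by c.length - j
decreasing_by
  · have := pvAltFindEnd_gt c j h hc
    omega
  · omega

theorem pvScan_eq_raw (c : List Bool) (j : Nat) :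
    pvAltScanRuns c j = (pvRawRuns c j).map (fun p => (p.1, p.2 - 2)) := by
  fun_induction pvAltScanRuns c j with
  | case1 j h hc ih => rw [pvRawRuns, dif_pos h, dif_pos hc]; simp [ih]
  | case2 j h hc ih => rw [pvRawRuns, dif_pos h, dif_neg hc]; exact ih
  | case3 j h => rw [pvRawRuns, dif_neg h]; rfl

theorem pvRaw_ok (c : List Bool) (j : Nat) :
    pvOkFrom (fun k => c.getD k false) j (pvRawRuns c j) := by
  fun_induction pvRawRuns c j with
  | case1 j h hc ih =>
    refine ⟨le_rfl, pvAltFindEnd_gt c j h hc, by omega, ?_, pvAltFindEnd_stop c j, ?_⟩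
    · intro k hk1 hk2
      exact pvAltFindEnd_covered c j k hk1 hk2
    · exact pvOk_shift _ _ _ ih (pvAltFindEnd_stop c j)
  | case2 j h hc ih =>
    exact pvOk_weaken _ _ _ ih (by simpa using hc)
  | case3 j h =>
    intro k hk
    exact List.getD_eq_default _ _ (by omega)

-- ---- merge correctness against the coverage function ----

theorem pvMergeGo_ok (c : Nat → Bool) :
    ∀ (rest : List (Nat × Nat)) (s e t : Nat),
      t ≤ s → s < e →
      (∀ p ∈ rest, s ≤ p.1 ∧ e ≤ p.2 ∧ p.1 < p.2) →
      rest.Pairwise (fun p q => p.1 ≤ q.1 ∧ p.2 ≤ q.2) →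
      (∀ j, t ≤ j → (c j = true ↔ (s ≤ j ∧ j < e) ∨ ∃ p ∈ rest, p.1 ≤ j ∧ j < p.2)) →
      pvOkFrom c t (pvMergeGo s e rest) := by
  intro rest
  induction rest with
  | nil =>
    intro s e t h1 h2 h3 h4 h5
    refine ⟨h1, h2, ?_, ?_, ?_, ?_⟩
    · intro j hj hjs
      rw [← Bool.not_eq_true]
      rw [h5 j hj]
      simp only [List.not_mem_nil, false_and, exists_false, or_false]
      omega
    · intro j hj1 hj2
      rw [h5 j (by omega)]
      simp only [List.not_mem_nil, false_and, exists_false, or_false]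
      omega
    · rw [← Bool.not_eq_true, h5 e (by omega)]
      simp only [List.not_mem_nil, false_and, exists_false, or_false]
      omega
    · intro j hj
      rw [← Bool.not_eq_true, h5 j (by omega)]
      simp only [List.not_mem_nil, false_and, exists_false, or_false]
      omega
  | cons q r ih =>
    intro s e t h1 h2 h3 h4 h5
    obtain ⟨s', e'⟩ := q
    obtain ⟨hq1, hq2, hq3⟩ := h3 (s', e') (List.mem_cons_self ..)
    have h3r : ∀ p ∈ r, s' ≤ p.1 ∧ e' ≤ p.2 ∧ p.1 < p.2 := by
      intro p hp
      have hpw := (List.pairwise_cons.mp h4).1 p hp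
      have hmem := h3 p (List.mem_cons_of_mem _ hp)
      exact ⟨hpw.1, hpw.2, hmem.2.2⟩
    have h4r : r.Pairwise (fun p q => p.1 ≤ q.1 ∧ p.2 ≤ q.2) := (List.pairwise_cons.mp h4).2
    rw [pvMergeGo]
    by_cases hcond : s' ≤ e
    · rw [if_pos hcond]
      apply ih s (max e e') t h1 (by omega)
      · intro p hp
        have := h3r p hp
        exact ⟨by omega, by omega, this.2.2⟩
      · exact h4r
      · intro j hj
        rw [h5 j hj]
        constructor
        · rintro (h | ⟨p, hp, hpj⟩)
          · left; omega
          · rcases List.mem_cons.mp hp with rfl | hpr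
            · left; simp at hpj ⊢; omega
            · right; exact ⟨p, hpr, hpj⟩
        · rintro (h | ⟨p, hp, hpj⟩)
          · by_cases hje : j < e
            · left; omega
            · right
              refine ⟨(s', e'), List.mem_cons_self .., ?_⟩
              simp only
              omega
          · right; exact ⟨p, List.mem_cons_of_mem _ hp, hpj⟩
    · rw [if_neg hcond]
      refine ⟨h1, h2, ?_, ?_, ?_, ?_⟩
      · intro j hj hjs
        rw [← Bool.not_eq_true, h5 j hj]
        rintro (h | ⟨p, hp, hpj⟩)
        · omega
        · rcases List.mem_cons.mp hp with rfl | hpr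
          · simp at hpj; omega
          · have := h3r p hpr
            omega
      · intro j hj1 hj2
        rw [h5 j (by omega)]
        left; omega
      · rw [← Bool.not_eq_true, h5 e (by omega)]
        rintro (h | ⟨p, hp, hpj⟩)
        · omega
        · rcases List.mem_cons.mp hp with rfl | hpr
          · simp at hpj; omega
          · have := h3r p hpr
            omega
      · apply ih s' e' (e + 1) (by omega) hq3 h3r h4r
        intro j hj
        rw [h5 j (by omega)]
        constructor
        · rintro (h | ⟨p, hp, hpj⟩)
          · omega
          · rcases List.mem_cons.mp hp with rfl | hpr
            · left; simpa using hpj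
            · right; exact ⟨p, hpr, hpj⟩
        · rintro (h | ⟨p, hp, hpj⟩)
          · right; exact ⟨(s', e'), List.mem_cons_self .., by simpa using h⟩
          · right; exact ⟨p, List.mem_cons_of_mem _ hp, hpj⟩



-- ---- coverage-mask characterization ----

theorem pvMarkLen (l : List Int) : ∀ (c : List Bool),
    (l.foldl (fun c2 k => PySem.List.pySetD c2 k true) c).length = c.length := by
  induction l with
  | nil => intro c; rfl
  | cons x l ih =>
    intro c
    simp only [List.foldl_cons, ih, PySem.List.length_pySetD]

theorem pvMarkInner (m : Nat) : ∀ (a b : Int) (c : List Bool) (j : Nat),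
    (b - a).toNat = m → 0 ≤ a → b ≤ (c.length : Int) →
    ((PySem.List.pyRange a b 1).foldl (fun c2 k => PySem.List.pySetD c2 k true) c).getD j false
      = (c.getD j false || decide (a ≤ (j : Int) ∧ (j : Int) < b)) := by
  induction m with
  | zero =>
    intro a b c j hm ha hb
    rw [PySem.List.pyRange_one_eq_nil (by omega)]
    have : ¬(a ≤ (j:Int) ∧ (j:Int) < b) := by omega
    simp [this]
  | succ m ih =>
    intro a b c j hm ha hb
    rw [PySem.List.pyRange_one_cons (by omega)]
    simp only [List.foldl_cons]
    rw [PySem.List.pySetD_of_nonneg c true ha]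
    rw [ih (a + 1) b _ j (by omega) (by omega) (by rw [List.length_set]; omega)]
    have hlt : a.toNat < c.length := by omega
    by_cases hj : j = a.toNat
    · subst hj
      have h1 : (c.set a.toNat true).getD a.toNat false = true := by
        simp [List.getD_eq_getElem?_getD, hlt]
      have h2 : (a ≤ (a.toNat : Int) ∧ (a.toNat : Int) < b) := by omega
      rw [h1, Bool.true_or, decide_eq_true h2, Bool.or_true]
    · have h1 : (c.set a.toNat true).getD j false = c.getD j false := by
        simp [List.getD_eq_getElem?_getD, List.getElem?_set_ne (by omega : a.toNat ≠ j)]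
      have h2 : ((a + 1 ≤ (j:Int)) ∧ (j:Int) < b) ↔ ((a ≤ (j:Int)) ∧ (j:Int) < b) := by omega
      rw [h1]
      simp only [h2]

theorem pvMarkMany (n : Nat) :
    ∀ (ks : List Nat) (c : List Bool) (j : Nat),
    (∀ k ∈ ks, min ((n : Nat) : Int) ((k : Int) + 8) + 2 ≤ (c.length : Int)) →
    (ks.foldl (fun c2 (k : Nat) => (PySem.List.pyRange (max 0 ((k : Int) - 2)) (min ((n : Nat) : Int) ((k : Int) + 8) + 2) 1).foldl
        (fun c3 i => PySem.List.pySetD c3 i true) c2) c).getD j false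
      = (c.getD j false || ks.any (fun k =>
          decide (max 0 ((k : Int) - 2) ≤ (j : Int) ∧
                  (j : Int) < min ((n : Nat) : Int) ((k : Int) + 8) + 2))) := by
  intro ks
  induction ks with
  | nil => intro c j _; simp
  | cons k ks ih =>
    intro c j hhi
    simp only [List.foldl_cons, List.any_cons]
    rw [ih _ j ?side]
    case side =>
      intro k' hk'
      rw [pvMarkLen]
      exact hhi k' (List.mem_cons_of_mem _ hk')
    rw [pvMarkInner ((min ((n : Nat) : Int) ((k : Int) + 8) + 2 - max 0 ((k : Int) - 2)).toNat)
      (max 0 ((k : Int) - 2)) (min ((n : Nat) : Int) ((k : Int) + 8) + 2) c j rfl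
      (le_max_left _ _) (hhi k (List.mem_cons_self ..))]
    rw [Bool.or_assoc]

theorem pvEnum_eq (xs : List String) :
    PySem.List.enumerate xs 0 = (List.range xs.length).map (fun k : Nat => ((k : Int), xs.getD k "")) := by
  rw [PySem.List.enumerate_eq_map_pyRange (d := "")]
  have h1 : PySem.List.len xs = ((xs.length : Nat) : Int) := by simp
  rw [h1, PySem.List.pyRange_zero_natCast, List.map_map]
  apply List.map_congr_left
  intro k hk
  simp

theorem pvCovered_getD (lines : List String) (j : Nat) :
    (pvAltCovered lines).getD j false
      = (pvHs lines).any (fun k =>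
          decide (max 0 ((k : Int) - 2) ≤ (j : Int) ∧
                  (j : Int) < min (lines.length : Int) ((k : Int) + 8) + 2)) := by
  unfold pvAltCovered
  rw [PySem.List.foldl_if_eq_foldl_filter]
  rw [pvEnum_eq, List.filter_map]
  simp only [List.foldl_map, PySem.List.len_eq]
  rw [pvMarkMany lines.length _ _ j ?side]
  case side =>
    intro k _
    simp only [List.length_replicate]
    push_cast
    omega
  have hrep : (List.replicate (lines.length + 2) false).getD j false = false := by
    simp only [List.getD_eq_getElem?_getD, List.getElem?_replicate]
    split <;> rfl
  rw [hrep, Bool.false_or]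
  rfl

theorem pvCovered_iff (lines : List String) (j : Nat) :
    (pvAltCovered lines).getD j false = true ↔
      ∃ k ∈ pvHs lines, k - 2 ≤ j ∧ j < min lines.length (k + 8) + 2 := by
  rw [pvCovered_getD, List.any_eq_true]
  constructor
  · rintro ⟨k, hk, hdec⟩
    rw [decide_eq_true_iff] at hdec
    exact ⟨k, hk, by omega, by omega⟩
  · rintro ⟨k, hk, h1, h2⟩
    refine ⟨k, hk, ?_⟩
    rw [decide_eq_true_iff]
    omega


-- ---- A's windows/merge fold, reduced to the hint-index list ----

theorem pvWindowsFold (lines : List String) :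
    ((PySem.List.enumerate lines 0).foldl
      (fun (ws : List (Int × Int)) p =>
        if pvHints.any (fun h => PySem.Str.isIn h (PySem.Str.lower p.2))
        then ws ++ [(max 0 (p.1 - 2), min (PySem.List.len lines) (p.1 + 8))]
        else ws) [])
    = (pvHs lines).map (fun k : Nat => (max 0 ((k : Int) - 2), min (lines.length : Int) ((k : Int) + 8))) := by
  rw [PySem.List.foldl_append_if]
  rw [pvEnum_eq, List.filter_map, List.map_map]
  simp only [PySem.List.len_eq, List.nil_append]
  rfl

def pvMergeStep (acc2 : List (Int × Int) × Int × Int) (nw : Int × Int) :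
    List (Int × Int) × Int × Int :=
  if nw.1 ≤ acc2.2.2 + 2 then (acc2.1, acc2.2.1, max acc2.2.2 nw.2)
  else (acc2.1 ++ [(acc2.2.1, acc2.2.2)], nw.1, nw.2)

theorem pvFoldMergeInt (ws : List (Int × Int)) : ∀ (acc : List (Int × Int)) (s e : Int),
    (ws.foldl pvMergeStep (acc, s, e)).1 ++
      [((ws.foldl pvMergeStep (acc, s, e)).2.1, (ws.foldl pvMergeStep (acc, s, e)).2.2)]
      = acc ++ pvMergeGoInt s e ws := by
  induction ws with
  | nil => intro acc s e; simp [pvMergeGoInt]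
  | cons q r ih =>
    intro acc s e
    obtain ⟨s', e'⟩ := q
    simp only [List.foldl_cons, pvMergeGoInt, pvMergeStep]
    by_cases h : s' ≤ e + 2
    · rw [if_pos h, if_pos h]
      exact ih acc s (max e e')
    · rw [if_neg h, if_neg h]
      rw [ih (acc ++ [(s, e)]) s' e']
      simp

theorem pvMergeGoInt_cast (n : Nat) : ∀ (ks : List Nat) (sN eP : Nat), 2 ≤ eP →
    pvMergeGoInt (sN : Int) ((eP : Int) - 2)
        (ks.map (fun k : Nat => (max 0 ((k : Int) - 2), min (n : Int) ((k : Int) + 8))))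
      = (pvMergeGo sN eP (ks.map (fun k : Nat => (k - 2, min n (k + 8) + 2)))).map
          (fun p => ((p.1 : Int), (p.2 : Int) - 2)) := by
  intro ks
  induction ks with
  | nil => intro sN eP h2; simp [pvMergeGoInt, pvMergeGo]
  | cons k t ih =>
    intro sN eP h2
    simp only [List.map_cons, pvMergeGoInt, pvMergeGo]
    by_cases hc : k - 2 ≤ eP
    · rw [if_pos (by omega : max 0 ((k : Int) - 2) ≤ (eP : Int) - 2 + 2), if_pos hc]
      have hmax : max ((eP : Int) - 2) (min (n : Int) ((k : Int) + 8))
          = ((max eP (min n (k + 8) + 2) : Nat) : Int) - 2 := by omega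
      rw [hmax]
      exact ih _ _ (by omega)
    · rw [if_neg (by omega : ¬ (max 0 ((k : Int) - 2) ≤ (eP : Int) - 2 + 2)), if_neg hc]
      have ha : max 0 ((k : Int) - 2) = (((k - 2 : Nat)) : Int) := by omega
      have hb : min (n : Int) ((k : Int) + 8) = (((min n (k + 8) + 2 : Nat)) : Int) - 2 := by omega
      rw [ha, hb, ih (k - 2) (min n (k + 8) + 2) (by omega), List.map_cons]

theorem pvMergeGo_ends : ∀ (rest : List (Nat × Nat)) (s e : Nat), 2 ≤ e →
    (∀ q ∈ rest, 2 ≤ q.2) → ∀ p ∈ pvMergeGo s e rest, 2 ≤ p.2 := by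
  intro rest
  induction rest with
  | nil =>
    intro s e he _ p hp
    simp only [pvMergeGo, List.mem_singleton] at hp
    subst hp; exact he
  | cons q r ih =>
    intro s e he hq p hp
    obtain ⟨s', e'⟩ := q
    rw [pvMergeGo] at hp
    by_cases hc : s' ≤ e
    · rw [if_pos hc] at hp
      exact ih s (max e e') (by omega) (fun q hq' => hq q (List.mem_cons_of_mem _ hq')) p hp
    · rw [if_neg hc] at hp
      rcases List.mem_cons.mp hp with rfl | hp'
      · exact he
      · exact ih s' e' (hq (s', e') (List.mem_cons_self ..)) (fun q hq' => hq q (List.mem_cons_of_mem _ hq')) p hp'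

theorem pvHs_lt (lines : List String) : ∀ k ∈ pvHs lines, k < lines.length := by
  intro k hk
  have := List.of_mem_filter hk
  have := List.mem_of_mem_filter hk
  simpa using List.mem_range.mp this

theorem pvHs_sorted (lines : List String) : (pvHs lines).Pairwise (· < ·) :=
  (List.pairwise_lt_range).filter _

theorem pvTake8 {α : Type} (xs : List α) : PySem.List.slice xs none (some 8) = xs.take 8 := by
  rw [PySem.List.slice_to xs (b := 8) (by omega)]
  rfl

-- the central equivalence: A's merged windows are B's scanned runs, cast to Int
theorem pvWindows_runs (lines : List String) :
    pvCollectWindows lines =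
      (PySem.List.slice (pvAltScanRuns (pvAltCovered lines) 0) none (some 8)).map
        (fun q => ((q.1 : Int), (q.2 : Int))) := by
  unfold pvCollectWindows
  have hstep : (fun (acc : List (Int × Int) × Int × Int) (nw : Int × Int) =>
      if nw.1 ≤ acc.2.2 + 2 then (acc.1, acc.2.1, max acc.2.2 nw.2)
      else (acc.1 ++ [(acc.2.1, acc.2.2)], nw.1, nw.2)) = pvMergeStep := rfl
  rw [pvWindowsFold lines]
  rcases hhs : pvHs lines with _ | ⟨h, t⟩ <;> dsimp only [List.map]
  · -- no hint line: no windows, and the mask is all-false so no runs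
    have hcb : ∀ j : Nat, (pvAltCovered lines).getD j false = false := by
      intro j
      rw [pvCovered_getD, hhs]
      rfl
    have hraw : pvRawRuns (pvAltCovered lines) 0 = [] := by
      apply pvOk_unique (fun k => (pvAltCovered lines).getD k false) _ _ 0
        (pvRaw_ok (pvAltCovered lines) 0)
      intro j _
      exact hcb j
    rw [pvScan_eq_raw, hraw]
    simp [pvTake8]
  · -- at least one hint line
    have hlt : ∀ k ∈ pvHs lines, k < lines.length := pvHs_lt lines
    rw [hhs] at hlt
    have hsort := pvHs_sorted lines
    rw [hhs] at hsort
    have hhlt : h < lines.length := hlt h (List.mem_cons_self ..)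
    have hht : ∀ k ∈ t, h < k := (List.pairwise_cons.mp hsort).1
    have htsort : t.Pairwise (· < ·) := (List.pairwise_cons.mp hsort).2
    have htlt : ∀ k ∈ t, k < lines.length := fun k hk => hlt k (List.mem_cons_of_mem _ hk)
    rw [hstep, pvFoldMergeInt]
    have ha : max 0 ((h : Int) - 2) = (((h - 2 : Nat)) : Int) := by omega
    have hb : min ((lines.length : Nat) : Int) ((h : Int) + 8)
        = (((min lines.length (h + 8) + 2 : Nat)) : Int) - 2 := by omega
    rw [List.nil_append, ha, hb,
      pvMergeGoInt_cast lines.length t (h - 2) (min lines.length (h + 8) + 2) (by omega)]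
    -- the reference merge equals the raw scanned runs
    have hmerge : pvRawRuns (pvAltCovered lines) 0
        = pvMergeGo (h - 2) (min lines.length (h + 8) + 2)
            (t.map (fun k : Nat => (k - 2, min lines.length (k + 8) + 2))) := by
      apply pvOk_unique (fun k => (pvAltCovered lines).getD k false) _ _ 0
        (pvRaw_ok (pvAltCovered lines) 0)
      apply pvMergeGo_ok
      · omega
      · have := hhlt; omega
      · intro p hp
        rcases List.mem_map.mp hp with ⟨k, hk, rfl⟩
        have h1 := hht k hk
        have h2 := htlt k hk
        refine ⟨by omega, by omega, by omega⟩
      · rw [List.pairwise_map]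
        exact htsort.imp (fun hlt' => ⟨by omega, by omega⟩)
      · intro j _
        rw [pvCovered_iff, hhs]
        constructor
        · rintro ⟨k, hk, h1, h2⟩
          rcases List.mem_cons.mp hk with rfl | hk'
          · left; omega
          · right
            exact ⟨(k - 2, min lines.length (k + 8) + 2),
              List.mem_map.mpr ⟨k, hk', rfl⟩, by omega⟩
        · rintro (⟨h1, h2⟩ | ⟨p, hp, h1, h2⟩)
          · exact ⟨h, List.mem_cons_self .., by omega, by omega⟩
          · rcases List.mem_map.mp hp with ⟨k, hk, rfl⟩
            exact ⟨k, List.mem_cons_of_mem _ hk, by omega, by omega⟩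
    rw [pvScan_eq_raw, hmerge, pvTake8, pvTake8]
    rw [← List.map_take, ← List.map_take, List.map_map]
    apply List.map_congr_left
    intro p hp
    have hp' := List.mem_of_mem_take hp
    have hpe : 2 ≤ p.2 := by
      refine pvMergeGo_ends _ _ _ (by omega) ?_ p hp'
      intro q hq
      rcases List.mem_map.mp hq with ⟨k, hk, rfl⟩
      simp only
      omega
    simp only [Function.comp_apply]
    have hc2 : ((p.2 - 2 : Nat) : Int) = (p.2 : Int) - 2 := by omega
    rw [hc2]


-- ---- line stripping: B's fused single pass = A's filter/map/filter pipeline ----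

theorem pvLinesFold (ls : List String) : ∀ (acc : List String),
    (ls.foldl
      (fun acc raw =>
        if PySem.Str.strip raw ≠ "" ∧
           pvDrops.any (fun noise => PySem.Str.isIn noise (PySem.Str.lower (PySem.Str.strip raw))) = false
        then acc ++ [PySem.Str.strip raw] else acc) acc)
    = acc ++ ((ls.filter (fun line => PySem.Str.strip line ≠ "")).map PySem.Str.strip).filter
        (fun line => ! pvDrops.any (fun noise => PySem.Str.isIn noise (PySem.Str.lower line))) := by
  induction ls with
  | nil => intro acc; simp
  | cons l rest ih =>
    intro acc
    simp only [List.foldl_cons]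
    by_cases h1 : PySem.Str.strip l ≠ ""
    · by_cases h2 : pvDrops.any (fun noise => PySem.Str.isIn noise (PySem.Str.lower (PySem.Str.strip l))) = false
      · rw [if_pos ⟨h1, h2⟩, ih, List.filter_cons, if_pos (by simpa using h1), List.map_cons,
          List.filter_cons, if_pos (by rw [h2]; rfl), List.append_assoc]
        rfl
      · rw [if_neg (fun hand => h2 hand.2), ih, List.filter_cons, if_pos (by simpa using h1),
          List.map_cons, List.filter_cons,
          if_neg (by simp only [Bool.not_eq_false] at h2; rw [h2]; simp)]
    · rw [if_neg (fun hand => h1 hand.1), ih, List.filter_cons,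
        if_neg (by simp only [not_not] at h1; simp [h1])]

-- ---- section assembly: separators between runs = separators after each window, last popped ----

theorem pvEnumSep (g : Nat × Nat → List String) :
    ∀ (rs : List (Nat × Nat)) (k : Int), 1 ≤ k → ∀ (acc : List String × PySem.Set String),
    (PySem.List.enumerate rs k).foldl
      (fun (acc : List String × PySem.Set String) p =>
        pvAltAdd (if p.1 ≠ 0 then (acc.1 ++ ["---"], acc.2) else acc) (g p.2)) acc
    = rs.foldl (fun acc r => pvAltAdd (acc.1 ++ ["---"], acc.2) (g r)) acc := by
  intro rs
  induction rs with
  | nil => intro k hk acc; rfl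
  | cons r rest ih =>
    intro k hk acc
    rw [PySem.List.enumerate_cons]
    simp only [List.foldl_cons]
    rw [if_pos (by omega : (k : Int) ≠ 0)]
    exact ih (k + 1) (by omega) _

theorem pvInterleave (g : Nat × Nat → List String) :
    ∀ (rs : List (Nat × Nat)) (t : List String) (s : PySem.Set String),
    rs.foldl (fun (acc : List String × PySem.Set String) r =>
        ((pvAltAdd acc (g r)).1 ++ ["---"], (pvAltAdd acc (g r)).2)) (t ++ ["---"], s)
    = ((rs.foldl (fun acc r => pvAltAdd (acc.1 ++ ["---"], acc.2) (g r)) (t, s)).1 ++ ["---"],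
       (rs.foldl (fun acc r => pvAltAdd (acc.1 ++ ["---"], acc.2) (g r)) (t, s)).2) := by
  intro rs
  induction rs with
  | nil => intro t s; rfl
  | cons r rest ih =>
    intro t s
    simp only [List.foldl_cons]
    exact ih (pvAltAdd (t ++ ["---"], s) (g r)).1 (pvAltAdd (t ++ ["---"], s) (g r)).2

-- ===== VERDICT (by name: the statement is the Claim_ definition above) =====
set_option maxHeartbeats 2000000 in
theorem abbreviate_representative_content_py_spec : Claim_equal_abbreviate_representative_content_py := by
  intro content _hdom
  unfold Spec_abbreviate_representative_content_py
  unfold abbreviate_representative_content_py abbreviate_representative_content_py_alt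
  dsimp only
  rw [pvLinesFold, List.nil_append]
  have hstrip : (((PySem.Str.splitlines (PySem.Str.strip (if content = "" then "" else content))).filter
      (fun line => PySem.Str.strip line ≠ "")).map PySem.Str.strip).filter
        (fun line => ! pvDrops.any (fun noise => PySem.Str.isIn noise (PySem.Str.lower line)))
      = pvStripNoiseLines content := rfl
  rw [hstrip]
  generalize pvStripNoiseLines content = L
  by_cases hnil : L = []
  · rw [if_pos hnil, if_pos hnil]
  · rw [if_neg hnil, if_neg hnil]
    rw [pvWindows_runs L]
    generalize PySem.List.slice (pvAltScanRuns (pvAltCovered L) 0) none (some 8) = R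
    have hAU : ∀ (t src : List String) (sn : PySem.Set String),
        pvAppendUnique t src sn = pvAltAdd (t, sn) src := fun _ _ _ => rfl
    rcases hRc : R with _ | ⟨r0, rest⟩
    · -- no runs: both skip the highlight section
      have hA0 : ¬ ((([] : List (Nat × Nat)).map (fun q : Nat × Nat => ((q.1 : Int), (q.2 : Int)))) ≠ ([] : List (Int × Int))) := by simp
      have hB0 : ¬ (([] : List (Nat × Nat)) ≠ ([] : List (Nat × Nat))) := by simp
      rw [if_neg hA0, if_neg hB0]
      simp only [hAU]
      by_cases hlen : 16 < L.length
      · rw [if_pos (show PySem.List.len L > 16 from by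
            simp only [gt_iff_lt, PySem.List.len_eq]; exact_mod_cast hlen), if_pos hlen]
      · rw [if_neg (show ¬ PySem.List.len L > 16 from by
            simp only [gt_iff_lt, PySem.List.len_eq]; exact_mod_cast hlen), if_neg hlen]
    · -- at least one run
      have hA : ((r0 :: rest).map (fun q : Nat × Nat => ((q.1 : Int), (q.2 : Int)))) ≠ ([] : List (Int × Int)) := by simp
      have hB : (r0 :: rest) ≠ ([] : List (Nat × Nat)) := by simp
      rw [if_pos hA, if_pos hB]
      have hfoldA : ∀ (init : List String × PySem.Set String),
          (((r0 :: rest).map (fun q : Nat × Nat => ((q.1 : Int), (q.2 : Int)))).foldl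
            (fun (acc : List String × PySem.Set String) w =>
              ((pvAppendUnique acc.1 (PySem.List.slice L (some w.1) (some w.2)) acc.2).1 ++ ["---"],
               (pvAppendUnique acc.1 (PySem.List.slice L (some w.1) (some w.2)) acc.2).2)) init)
          = ((r0 :: rest).foldl
            (fun (acc : List String × PySem.Set String) r =>
              ((pvAltAdd acc ((L.drop r.1).take (r.2 - r.1))).1 ++ ["---"],
               (pvAltAdd acc ((L.drop r.1).take (r.2 - r.1))).2)) init) := by
        intro init
        rw [List.foldl_map]
        apply PySem.List.foldl_congr_mem
        intro acc r _
        rw [PySem.List.slice_natCast]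
        rfl
      rw [hfoldA]
      simp only [List.foldl_cons]
      rw [pvInterleave (fun r => (L.drop r.1).take (r.2 - r.1)) rest]
      rw [PySem.List.enumerate_cons]
      simp only [List.foldl_cons]
      have h00 : ¬ ((0 : Int) ≠ 0) := by simp
      rw [if_neg h00]
      rw [show ((0 : Int) + 1) = 1 from by norm_num]
      rw [pvEnumSep (fun r => (L.drop r.1).take (r.2 - r.1)) rest 1 le_rfl]
      simp only [Prod.mk.eta]
      generalize List.foldl
          (fun (acc : List String × PySem.Set String) r =>
            pvAltAdd (acc.1 ++ ["---"], acc.2) ((L.drop r.1).take (r.2 - r.1)))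
          (pvAltAdd (["--- 重点片段 ---"], ([] : PySem.Set String))
            ((L.drop r0.1).take (r0.2 - r0.1))) rest = Y
      have hpop : Y.1 ++ ["---"] ≠ [] ∧ (Y.1 ++ ["---"]).getLast? = some "---" :=
        ⟨by simp, List.getLast?_concat⟩
      rw [if_pos hpop, List.dropLast_concat]
      simp only [hAU]
      by_cases hlen : 16 < L.length
      · rw [if_pos (show PySem.List.len L > 16 from by
            simp only [gt_iff_lt, PySem.List.len_eq]; exact_mod_cast hlen), if_pos hlen]
      · rw [if_neg (show ¬ PySem.List.len L > 16 from by
            simp only [gt_iff_lt, PySem.List.len_eq]; exact_mod_cast hlen), if_neg hlen]
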